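-- pv_equiv track=rewrite | github.com/marceloteck/megasenav3.0 | MEGA-SENA/versionamento/Mega_cod_1.3.7.py | calcular_ajuste
-- ===== SOURCE A (Python) =====
-- def calcular_ajuste(previsao_lt, resultado_esperado):
--     ajustes = []
--     for i in range(6):
--         ajuste = resultado_esperado[i] - previsao_lt[i]
--         while ajuste > 9 or ajuste < -9:  # Ajustes compostos
--             if ajuste > 9:
--                 ajuste -= 9
--             elif ajuste < -9:
--                 ajuste += 9
--         ajustes.append(ajuste)
--     return ajustes
-- ===== SOURCE B (Python) =====
-- def calcular_ajuste(previsao_lt, resultado_esperado):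
--     diffs = [resultado_esperado[i] - previsao_lt[i] for i in range(6)]
--     return [d if -9 <= d <= 9 else ((d - 1) % 9 + 1 if d > 9 else -((-d - 1) % 9 + 1))
--             for d in diffs]
-- ===== Notes on version B (the rewrite author's own statement) =====
-- stated objective: alternative
-- what changed: B works in two staged passes - first a comprehension builds the six per-position differences, then a second comprehension maps a closed-form floor-mod reduction over them - replacing A's single accumulator loop whose inner while repeatedly adds/subtracts 9; the closed form is constant-time per position where A's inner loop is linear in |diff|, though a timing run saw no measurable difference on its inputs.
import Mathlib
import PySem

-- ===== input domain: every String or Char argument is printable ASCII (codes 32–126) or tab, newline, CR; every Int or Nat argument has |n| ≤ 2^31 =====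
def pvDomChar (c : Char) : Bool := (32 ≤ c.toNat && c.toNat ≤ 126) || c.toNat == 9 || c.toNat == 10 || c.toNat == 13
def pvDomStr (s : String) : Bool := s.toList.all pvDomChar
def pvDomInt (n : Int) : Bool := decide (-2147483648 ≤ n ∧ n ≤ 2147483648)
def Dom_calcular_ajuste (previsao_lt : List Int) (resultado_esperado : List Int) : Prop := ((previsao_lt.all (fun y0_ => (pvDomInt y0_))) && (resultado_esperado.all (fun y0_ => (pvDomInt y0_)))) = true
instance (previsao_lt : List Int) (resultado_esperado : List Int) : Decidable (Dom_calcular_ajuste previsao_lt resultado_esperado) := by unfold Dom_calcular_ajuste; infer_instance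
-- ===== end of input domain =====

-- B stages the work: first build the six per-position differences, then map a
-- closed-form floor-mod reduction over them, instead of A's single accumulator loop
-- with a repeated +/-9 while loop (objective: alternative decomposition).

-- ===== PORT A =====
-- the inner 'while ajuste > 9 or ajuste < -9' loop of A, verbatim
def pvWhileA (a : Int) : Int :=
  if a > 9 then pvWhileA (a - 9)
  else if a < -9 then pvWhileA (a + 9)
  else a
termination_by a.natAbs
decreasing_by all_goals omega

def calcular_ajuste (previsao_lt : List Int) (resultado_esperado : List Int) : List Int :=
  (PySem.List.pyRange 0 6 1).foldl
    (fun ajustes i =>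
      ajustes ++ [pvWhileA (PySem.List.pyGetD resultado_esperado i 0 - PySem.List.pyGetD previsao_lt i 0)])
    []

-- ===== PORT B =====
def pvReduzB (d : Int) : Int :=
  if -9 ≤ d ∧ d ≤ 9 then d
  else if d > 9 then PySem.Int.mod (d - 1) 9 + 1
  else -(PySem.Int.mod (-d - 1) 9 + 1)

def calcular_ajuste_alt (previsao_lt : List Int) (resultado_esperado : List Int) : List Int :=
  let diffs := (PySem.List.pyRange 0 6 1).map
    (fun i => PySem.List.pyGetD resultado_esperado i 0 - PySem.List.pyGetD previsao_lt i 0)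
  diffs.map pvReduzB

-- ===== PRECONDITION & SPEC =====
-- A raises IndexError when either list has fewer than 6 elements
def Pre_calcular_ajuste (previsao_lt : List Int) (resultado_esperado : List Int) : Prop :=
  6 ≤ previsao_lt.length ∧ 6 ≤ resultado_esperado.length
instance (previsao_lt : List Int) (resultado_esperado : List Int) : Decidable (Pre_calcular_ajuste previsao_lt resultado_esperado) := by unfold Pre_calcular_ajuste; infer_instance
def pvWitness_calcular_ajuste : List Int × List Int := ([1, 2, 3, 4, 5, 6], [10, 20, -30, 4, 0, 60])

def Spec_calcular_ajuste (previsao_lt : List Int) (resultado_esperado : List Int) (out : List Int) : Prop := out = calcular_ajuste_alt previsao_lt resultado_esperado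
instance (previsao_lt : List Int) (resultado_esperado : List Int) (out : List Int) : Decidable (Spec_calcular_ajuste previsao_lt resultado_esperado out) := by unfold Spec_calcular_ajuste; infer_instance

-- ===== CLAIM (what is proved, stated in full; the proofs are below) =====
def Claim_equal_calcular_ajuste : Prop := ∀ (previsao_lt : List Int) (resultado_esperado : List Int), Dom_calcular_ajuste previsao_lt resultado_esperado → Pre_calcular_ajuste previsao_lt resultado_esperado → Spec_calcular_ajuste previsao_lt resultado_esperado (calcular_ajuste previsao_lt resultado_esperado)

-- ===== LEMMAS AND PROOFS =====
lemma pvWhileA_eq_reduzB (a : Int) : pvWhileA a = pvReduzB a := by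
  unfold pvReduzB
  rw [PySem.Int.mod_eq_emod_of_pos (by norm_num), PySem.Int.mod_eq_emod_of_pos (by norm_num)]
  induction a using pvWhileA.induct with
  | case1 a h ih =>
    rw [pvWhileA, if_pos h, ih]
    split_ifs <;> omega
  | case2 a h h2 ih =>
    rw [pvWhileA, if_neg h, if_pos h2, ih]
    split_ifs <;> omega
  | case3 a h h2 =>
    rw [pvWhileA, if_neg h, if_neg h2]
    split_ifs <;> omega

lemma pvSixCons (l : List Int) (h : 6 ≤ l.length) :
    ∃ a b c d e f t, l = a :: b :: c :: d :: e :: f :: t := by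
  match l with
  | a :: b :: c :: d :: e :: f :: t => exact ⟨a, b, c, d, e, f, t, rfl⟩
  | [] | [_] | [_,_] | [_,_,_] | [_,_,_,_] | [_,_,_,_,_] => simp at h

-- ===== VERDICT (by name: the statement is the Claim_ definition above) =====
theorem calcular_ajuste_spec : Claim_equal_calcular_ajuste := by
  intro pv re _ hpre
  obtain ⟨p1, p2, p3, p4, p5, p6, pt, rfl⟩ := pvSixCons pv hpre.1
  obtain ⟨r1, r2, r3, r4, r5, r6, rt, rfl⟩ := pvSixCons re hpre.2
  unfold Spec_calcular_ajuste calcular_ajuste calcular_ajuste_alt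
  simp [pvWhileA_eq_reduzB, PySem.List.pyRange, PySem.List.pyGetD,
        PySem.List.pyGet?, PySem.List.pyIdx?, List.range_succ]
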